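-- pv_equiv track=rewrite | github.com/wooseungw/panollava | panovlm/model copy.py | _infer_hw
-- ===== SOURCE A (Python) =====
-- import math
--
-- def _infer_hw(num_patches: int) -> tuple[int, int]:
--     """
--     주어진 패치 토큰 개수(`num_patches`)로부터 (H, W) 그리드 크기를 추정합니다.
--     1) 완전제곱 → 정사각형
--     2) 아니면 √N 이하에서 가장 큰 약수를 찾아 (height, width = N//height) 반환
--        (예: 256 → 16×16, 140 → 10×14)
--     """
--     height = int(math.sqrt(num_patches))
--     if height * height == num_patches:
--         return height, height
--
--     for height in range(height, 0, -1):
--         if num_patches % height == 0: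
--             return height, num_patches // height
--     raise ValueError(f"그리드 추정 실패: 패치 수={num_patches}")
-- ===== SOURCE B (Python) =====
-- import math
--
-- def _infer_hw(num_patches: int) -> tuple[int, int]:
--     """Single ascending pass: keep the largest divisor of num_patches that is <= isqrt(num_patches)."""
--     if num_patches == 0:
--         return 0, 0
--     best = 1
--     for i in range(2, math.isqrt(num_patches) + 1):
--         if num_patches % i == 0:
--             best = i
--     return best, num_patches // best
-- ===== Notes on version B (the rewrite author's own statement) =====
-- stated objective: alternative
-- what changed: B replaces A's two-phase structure (perfect-square early return, then a downward first-divisor scan with early exit and a dead raise path) by a single ascending foldl over range(2, isqrt(N)+1) maintaining a running maximum divisor, with only N==0 special-cased; same asymptotic cost.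
import Mathlib
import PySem

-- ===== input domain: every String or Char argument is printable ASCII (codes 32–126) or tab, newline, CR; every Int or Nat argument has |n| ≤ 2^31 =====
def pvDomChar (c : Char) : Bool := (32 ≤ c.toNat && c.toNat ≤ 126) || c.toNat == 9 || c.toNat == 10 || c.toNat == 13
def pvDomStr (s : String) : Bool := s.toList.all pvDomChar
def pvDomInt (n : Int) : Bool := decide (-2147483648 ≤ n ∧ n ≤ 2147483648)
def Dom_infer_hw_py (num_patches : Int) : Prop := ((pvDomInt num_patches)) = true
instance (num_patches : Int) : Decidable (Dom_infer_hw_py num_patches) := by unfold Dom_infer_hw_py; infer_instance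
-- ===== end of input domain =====

-- B restructures A: one ascending running-maximum-divisor foldl instead of perfect-square branch + downward
-- first-divisor scan; return values proved equal on all num_patches ≥ 0 (A raises ValueError on negatives).

-- ===== PORT A =====
-- `int(math.sqrt(n))` is ported as Nat.sqrt, exact for 0 ≤ n ≤ 2^31 (double sqrt is correctly rounded and
-- the gap to the nearest square exceeds the rounding error there); math.sqrt raises ValueError for n < 0,
-- excluded by Pre_.
-- `for height in range(height, 0, -1): if n % height == 0: return …` with the final `raise ValueError`:
-- first match scanning h, h-1, …, 1; none = the raise (unreachable when n ≥ 1, outside Pre_ otherwise).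
def inferHwLoopA (n : Int) : Nat → Option (Int × Int)
  | 0 => none
  | h+1 =>
    if PySem.Int.mod n ((h : Int)+1) = 0 then some (((h : Int)+1), PySem.Int.floordiv n ((h : Int)+1))
    else inferHwLoopA n h

def infer_hw_py (num_patches : Int) : Int × Int :=
  let height : Int := (Nat.sqrt num_patches.toNat : Int)
  if height * height = num_patches then (height, height)
  else (inferHwLoopA num_patches num_patches.toNat.sqrt).getD (0, 0)

-- ===== PORT B =====
-- math.isqrt = Nat.sqrt on the nonnegative domain (raises ValueError for n < 0, outside Pre_).
def infer_hw_py_alt (num_patches : Int) : Int × Int :=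
  if num_patches = 0 then (0, 0)
  else
    let best : Int :=
      (PySem.List.pyRange 2 ((Nat.sqrt num_patches.toNat : Int) + 1) 1).foldl
        (fun best i => if PySem.Int.mod num_patches i = 0 then i else best) 1
    (best, PySem.Int.floordiv num_patches best)

-- ===== PRECONDITION & SPEC =====
-- A raises ValueError ('math domain error') for every negative input; nothing else is excluded.
def Pre_infer_hw_py (num_patches : Int) : Prop := 0 ≤ num_patches
instance (num_patches : Int) : Decidable (Pre_infer_hw_py num_patches) := by unfold Pre_infer_hw_py; infer_instance
def pvWitness_infer_hw_py : Int := 140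

def Spec_infer_hw_py (num_patches : Int) (out : Int × Int) : Prop := out = infer_hw_py_alt num_patches
instance (num_patches : Int) (out : Int × Int) : Decidable (Spec_infer_hw_py num_patches out) := by unfold Spec_infer_hw_py; infer_instance

-- ===== CLAIM (what is proved, stated in full; the proofs are below) =====
def Claim_equal_infer_hw_py : Prop := ∀ (num_patches : Int), Dom_infer_hw_py num_patches → Pre_infer_hw_py num_patches → Spec_infer_hw_py num_patches (infer_hw_py num_patches)

-- ===== LEMMAS AND PROOFS =====

-- B's ascending fold equals (first component of) A's downward first-match scan, 1 if none.
lemma foldl_eq_loopA (n : Int) (h : Nat) :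
    (PySem.List.pyRange 2 ((h : Int) + 1) 1).foldl
      (fun best i => if PySem.Int.mod n i = 0 then i else best) 1
    = ((inferHwLoopA n h).map Prod.fst).getD 1 := by
  induction h with
  | zero =>
    rw [PySem.List.pyRange_one_eq_nil (by norm_num)]
    simp [inferHwLoopA]
  | succ k ih =>
    match k with
    | 0 =>
      rw [PySem.List.pyRange_one_eq_nil (by norm_num)]
      simp [inferHwLoopA]
    | Nat.succ m =>
      have hle : (2 : Int) ≤ ((m : Int) + 1) + 1 := by
        have : (0 : Int) ≤ (m : Int) := Int.natCast_nonneg m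
        omega
      have hcast : ((Nat.succ m + 1 : Nat) : Int) + 1 = (((m : Int) + 1) + 1) + 1 := by
        push_cast; ring
      rw [hcast, PySem.List.pyRange_one_succ_right hle, List.foldl_append]
      simp only [List.foldl_cons, List.foldl_nil]
      by_cases hdvd : PySem.Int.mod n (((m : Int) + 1) + 1) = 0
      · have : inferHwLoopA n (Nat.succ m + 1)
            = some ((((m : Int) + 1) + 1), PySem.Int.floordiv n (((m : Int) + 1) + 1)) := by
          simp only [inferHwLoopA]
          rw [if_pos (by push_cast; exact hdvd)]
          push_cast
          ring_nf
        rw [this]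
        simp [hdvd]
      · have : inferHwLoopA n (Nat.succ m + 1) = inferHwLoopA n (Nat.succ m) := by
          simp only [inferHwLoopA]
          rw [if_neg (by push_cast; exact hdvd)]
        rw [this, if_neg hdvd]
        have hcast2 : ((Nat.succ m : Nat) : Int) + 1 = ((m : Int) + 1) + 1 := by push_cast; ring
        rw [← hcast2] at *
        exact ih
-- A's scan always finds a divisor when it starts at h ≥ 1 (since 1 divides n).
lemma loopA_finds (n : Int) (h : Nat) (hh : 1 ≤ h) :
    ∃ d : Int, inferHwLoopA n h = some (d, PySem.Int.floordiv n d) := by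
  induction h with
  | zero => omega
  | succ k ih =>
    match k with
    | 0 =>
      refine ⟨1, ?_⟩
      simp [inferHwLoopA]
    | Nat.succ m =>
      by_cases hdvd : PySem.Int.mod n ((Nat.succ m : Int) + 1) = 0
      · exact ⟨(Nat.succ m : Int) + 1, by simp only [inferHwLoopA]; rw [if_pos hdvd]⟩
      · obtain ⟨d, hd⟩ := ih (by omega)
        exact ⟨d, by simp only [inferHwLoopA]; rw [if_neg hdvd]; exact hd⟩

lemma sqrt_dvd_floordiv (h : Nat) (hh : 1 ≤ h) :
    PySem.Int.floordiv ((h : Int) * (h : Int)) (h : Int) = (h : Int) := by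
  have hpos : (0 : Int) < (h : Int) := by exact_mod_cast hh
  rw [PySem.Int.floordiv_eq_ediv_of_pos hpos]
  exact Int.mul_ediv_cancel_left _ (by omega)

-- ===== VERDICT (by name: the statement is the Claim_ definition above) =====
theorem infer_hw_py_spec : Claim_equal_infer_hw_py := by
  intro n _ hpre
  unfold Spec_infer_hw_py infer_hw_py infer_hw_py_alt
  by_cases h0 : n = 0
  · subst h0; decide
  · have hge : (0:Int) ≤ n := hpre
    have hn : 1 ≤ n := by omega
    have hn1 : 1 ≤ n.toNat := by omega
    set h := n.toNat.sqrt with hhdef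
    have hh1 : 1 ≤ h := Nat.one_le_iff_ne_zero.mpr (by
      simp [hhdef, Nat.sqrt_eq_zero]; omega)
    rw [if_neg h0]
    simp only
    rw [foldl_eq_loopA n h]
    by_cases hsq : ((h : Int) * (h : Int) = n)
    · rw [if_pos hsq]
      have hmod : PySem.Int.mod n (h : Int) = 0 := by
        rw [PySem.Int.mod_eq_zero_iff_dvd, ← hsq]
        exact Dvd.intro _ rfl
      have hloop : inferHwLoopA n h = some ((h : Int), PySem.Int.floordiv n (h : Int)) := by
        obtain ⟨m, hm⟩ : ∃ m, h = m + 1 := ⟨h - 1, by omega⟩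
        rw [hm] at hmod ⊢
        push_cast at hmod
        simp only [inferHwLoopA]
        rw [if_pos hmod]
        push_cast
        ring_nf
      rw [hloop]
      have : PySem.Int.floordiv n (h : Int) = (h : Int) := by
        rw [← hsq]; exact sqrt_dvd_floordiv h hh1
      simp [this]
    · rw [if_neg hsq]
      obtain ⟨d, hd⟩ := loopA_finds n h hh1
      rw [hd]
      simp
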